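-- pv_equiv track=rewrite | github.com/danbi5228/Algorithm | 20200905/programmers_이상한문자만들기.py | solution
-- ===== SOURCE A (Python) =====
-- def solution(s):
--     answer = ''
--
--     s = s.lower()
--     s_arr = s.split(' ')
--
--     for word in s_arr:
--         for i in range(len(word)):
--             if i%2 == 0:
--                 answer += word[i].upper()
--             else:
--                 answer += word[i]
--         answer += ' '
--     return answer[:-1]
-- ===== SOURCE B (Python) =====
-- def solution(s):
--     out = []
--     word_pos = 0
--     for c in s:
--         if c == ' ':
--             out.append(' ')
--             word_pos = 0
--         else:
--             out.append(c.upper() if word_pos % 2 == 0 else c.lower())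
--             word_pos += 1
--     return ''.join(out)
-- ===== Notes on version B (the rewrite author's own statement) =====
-- stated objective: simpler
-- what changed: Replaced lower+split(' ')+nested index loop+trailing-space trim by a single pass over the characters with a per-word position counter reset on each space.
import Mathlib
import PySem

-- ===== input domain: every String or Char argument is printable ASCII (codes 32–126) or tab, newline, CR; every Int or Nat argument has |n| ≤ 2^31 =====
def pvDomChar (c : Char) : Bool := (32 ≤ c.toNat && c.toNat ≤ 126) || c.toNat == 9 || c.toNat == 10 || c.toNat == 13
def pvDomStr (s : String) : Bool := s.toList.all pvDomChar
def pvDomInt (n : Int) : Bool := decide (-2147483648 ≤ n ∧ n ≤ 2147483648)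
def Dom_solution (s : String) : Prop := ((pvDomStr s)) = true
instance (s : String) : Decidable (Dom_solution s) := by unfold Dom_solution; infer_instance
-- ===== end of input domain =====

-- B replaces lower+split(' ')+nested index loop+answer[:-1] by one pass with a per-word position counter (objective: simpler).

-- ===== PORT A =====
-- inner 'for i in range(len(word))' loop body; word[i] is in range, so pyGetD with a dummy default is exact
def solAInner (word : List Char) (answer : List Char) : List Char :=
  (PySem.List.pyRange 0 (word.length : Int) 1).foldl
    (fun a i =>
      if PySem.Int.mod i 2 = 0 then a ++ [PySem.Chars.upperChar (PySem.List.pyGetD word i ' ')]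
      else a ++ [PySem.List.pyGetD word i ' ']) answer

def solution (s : String) : String :=
  String.ofList (PySem.List.slice
    ((PySem.Chars.splitOn (PySem.Chars.lower s.toList) [' ']).foldl
      (fun answer word => solAInner word answer ++ [' ']) [])
    none (some (-1)))

-- ===== PORT B =====
def solBStep : Nat × List Char → Char → Nat × List Char
  | (wp, out), c =>
    if c = ' ' then (0, out ++ [' '])
    else (wp + 1, out ++ [if wp % 2 = 0 then PySem.Chars.upperChar c else PySem.Chars.lowerChar c])

def solution_alt (s : String) : String :=
  String.ofList (s.toList.foldl solBStep (0, [])).2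

-- ===== PRECONDITION & SPEC =====
def Spec_solution (s : String) (out : String) : Prop := out = solution_alt s
instance (s : String) (out : String) : Decidable (Spec_solution s out) := by unfold Spec_solution; infer_instance

-- ===== CLAIM (what is proved, stated in full; the proofs are below) =====
def Claim_equal_solution : Prop := ∀ (s : String), Dom_solution s → Spec_solution s (solution s)

-- ===== LEMMAS AND PROOFS =====

-- reference single pass
def R : List Char → Nat → List Char
  | [], _ => []
  | c :: cs, wp =>
    if c = ' ' then ' ' :: R cs 0
    else (if wp % 2 = 0 then PySem.Chars.upperChar c else PySem.Chars.lowerChar c) :: R cs (wp + 1)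

-- structural split on ' ' : (first word, remaining words)
def sp : List Char → List Char × List (List Char)
  | [] => ([], [])
  | c :: cs =>
    let p := sp cs
    if c = ' ' then ([], p.1 :: p.2) else (c :: p.1, p.2)

-- structural per-word transform with running index
def trN : List Char → Nat → List Char
  | [], _ => []
  | c :: cs, i =>
    (if i % 2 = 0 then PySem.Chars.upperChar c else c) :: trN cs (i + 1)

theorem char_le_iff (a b : Char) : a ≤ b ↔ a.toNat ≤ b.toNat := by
  rw [Char.le_def]; exact UInt32.le_iff_toNat_le

theorem char_eq_of_toNat {a b : Char} (h : a.toNat = b.toNat) : a = b := by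
  apply Char.ext; exact UInt32.toNat_inj.mp h

theorem toNat_ofNat_add32 (c : Char) (h : c.toNat ≤ 90) :
    (Char.ofNat (c.toNat + 32)).toNat = c.toNat + 32 := by
  rw [Char.toNat_ofNat, if_pos]
  exact Or.inl (by omega)

theorem lowerChar_eq_space_iff (c : Char) : PySem.Chars.lowerChar c = ' ' ↔ c = ' ' := by
  simp only [PySem.Chars.lowerChar, PySem.Chars.isupper]
  have hA : ('A').toNat = 65 := rfl
  have hZ : ('Z').toNat = 90 := rfl
  have hsp : (' ').toNat = 32 := rfl
  split
  · rename_i h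
    simp only [Bool.and_eq_true, decide_eq_true_eq, char_le_iff, hA, hZ] at h
    constructor
    · intro he
      have h32 := toNat_ofNat_add32 c (by omega)
      have : (Char.ofNat (c.toNat + 32)).toNat = (' ').toNat := by rw [he]
      omega
    · intro he
      subst he
      simp [hsp] at h
  · simp

theorem upperChar_lowerChar (c : Char) :
    PySem.Chars.upperChar (PySem.Chars.lowerChar c) = PySem.Chars.upperChar c := by
  simp only [PySem.Chars.lowerChar, PySem.Chars.upperChar, PySem.Chars.isupper, PySem.Chars.islower]
  have hA : ('A').toNat = 65 := rfl
  have hZ : ('Z').toNat = 90 := rfl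
  have ha : ('a').toNat = 97 := rfl
  have hz : ('z').toNat = 122 := rfl
  split
  · rename_i h
    simp only [Bool.and_eq_true, decide_eq_true_eq, char_le_iff, hA, hZ] at h
    have hv := toNat_ofNat_add32 c (by omega)
    have h1 : ('a' ≤ Char.ofNat (c.toNat + 32)) := by rw [char_le_iff, ha, hv]; omega
    have h2 : (Char.ofNat (c.toNat + 32) ≤ 'z') := by rw [char_le_iff, hv, hz]; omega
    have h3 : ¬ ('a' ≤ c ∧ c ≤ 'z') := by
      rw [char_le_iff, char_le_iff, ha, hz]; omega
    simp only [h1, h2, decide_true, Bool.and_self, if_true]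
    rw [if_neg (by simpa [Bool.and_eq_true, decide_eq_true_eq] using h3)]
    apply char_eq_of_toNat
    rw [hv]
    have he : c.toNat + 32 - 32 = c.toNat := by omega
    rw [he, Char.toNat_ofNat, if_pos (Or.inl (by omega))]
  · rfl

-- sp on a lowered list, char by char
theorem sp_lower_cons (c : Char) (cs : List Char) :
    sp (PySem.Chars.lower (c :: cs)) =
      (if c = ' ' then ([], (sp (PySem.Chars.lower cs)).1 :: (sp (PySem.Chars.lower cs)).2)
       else (PySem.Chars.lowerChar c :: (sp (PySem.Chars.lower cs)).1, (sp (PySem.Chars.lower cs)).2)) := by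
  simp only [PySem.Chars.lower, List.map_cons, sp]
  by_cases h : c = ' '
  · subst h
    have hl : PySem.Chars.lowerChar ' ' = ' ' := rfl
    simp [hl]
  · rw [if_neg ((not_congr (lowerChar_eq_space_iff c)).2 h), if_neg h]

-- splitOn.go fuel-based recursion on sep " ", characterized by sp
theorem splitOn_go_spec :
    ∀ (fuel : Nat) (l cur : List Char) (acc : List (List Char)), l.length < fuel →
      PySem.Chars.splitOn.go [' '] fuel l cur acc =
        acc.reverse ++ ((cur.reverse ++ (sp l).1) :: (sp l).2) := by
  intro fuel
  induction fuel with
  | zero => intro l cur acc h; omega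
  | succ fuel ih =>
    intro l cur acc h
    cases l with
    | nil => simp [PySem.Chars.splitOn.go, sp]
    | cons x rest =>
      simp only [PySem.Chars.splitOn.go]
      by_cases hx : x = ' '
      · subst hx
        rw [if_pos (by simp [List.isPrefixOf])]
        simp only [List.length_cons] at h
        rw [ih _ _ _ (by simpa using Nat.lt_of_succ_lt_succ h)]
        simp [sp]
      · rw [if_neg (by simp [List.isPrefixOf]; exact fun hc => hx hc.symm)]
        simp only [List.length_cons] at h
        rw [ih _ _ _ (Nat.lt_of_succ_lt_succ h)]
        simp [sp, hx]

theorem splitOn_eq_sp (l : List Char) :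
    PySem.Chars.splitOn l [' '] = (sp l).1 :: (sp l).2 := by
  unfold PySem.Chars.splitOn
  rw [splitOn_go_spec (l.length + 1) l [] [] (by omega)]
  simp

-- the inner index loop as a map with running offset
theorem trN_eq_map (w : List Char) :
    ∀ k, trN w k =
      (List.range w.length).map
        (fun i => if (i + k) % 2 = 0 then PySem.Chars.upperChar (w.getD i ' ') else w.getD i ' ') := by
  induction w with
  | nil => intro k; simp [trN]
  | cons x xs ih =>
    intro k
    simp only [trN, List.length_cons, List.range_succ_eq_map, List.map_cons, List.map_map]
    congr 1
    · simp
    · rw [ih (k + 1)]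
      apply List.map_congr_left
      intro i _
      have h1 : i + 1 + k = i + (k + 1) := by omega
      simp [Function.comp, h1, Nat.succ_eq_add_one]

theorem solAInner_eq (w a : List Char) : solAInner w a = a ++ trN w 0 := by
  unfold solAInner
  rw [PySem.List.pyRange_zero_natCast, List.foldl_map]
  have hfun : (fun (a : List Char) (i : Nat) =>
      if PySem.Int.mod (↑i) 2 = 0 then a ++ [PySem.Chars.upperChar (PySem.List.pyGetD w (↑i) ' ')]
      else a ++ [PySem.List.pyGetD w (↑i) ' ']) =
      (fun (a : List Char) (i : Nat) =>
        a ++ [if i % 2 = 0 then PySem.Chars.upperChar (w.getD i ' ') else w.getD i ' ']) := by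
    funext a i
    have hm : PySem.Int.mod (↑i) 2 = ((i % 2 : Nat) : Int) := by
      exact_mod_cast PySem.Int.mod_natCast i 2
    rw [PySem.List.pyGetD_natCast, hm]
    simp only [Nat.cast_eq_zero]
    split <;> rfl
  rw [hfun, PySem.List.foldl_append_singleton_eq_map, trN_eq_map w 0]
  congr 1

-- main bridge: the single pass equals per-word trN over the split of the lowered list
theorem R_eq_split (cs : List Char) :
    ∀ wp, R cs wp =
      trN (sp (PySem.Chars.lower cs)).1 wp ++
        ((sp (PySem.Chars.lower cs)).2.map (fun w => ' ' :: trN w 0)).flatten := by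
  induction cs with
  | nil => intro wp; simp [R, PySem.Chars.lower, sp, trN]
  | cons c cs ih =>
    intro wp
    rw [sp_lower_cons]
    by_cases h : c = ' '
    · subst h
      simp only [R]
      rw [ih 0]
      simp [trN]
    · simp only [if_neg h, R, trN]
      rw [ih (wp + 1)]
      simp only [List.cons_append]
      congr 1
      by_cases hp : wp % 2 = 0
      · simp [hp, upperChar_lowerChar]
      · simp [hp]

-- B's fold accumulates R
theorem foldl_solBStep (cs : List Char) :
    ∀ wp out, (cs.foldl solBStep (wp, out)).2 = out ++ R cs wp := by
  induction cs with
  | nil => intro wp out; simp [R]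
  | cons c cs ih =>
    intro wp out
    simp only [List.foldl_cons, solBStep, R]
    by_cases h : c = ' '
    · simp only [ih, h]
      simp
    · simp only [if_neg h, ih]
      simp

-- A's outer fold flattens, with the trailing space moved to the end
theorem flatten_shift (ws : List (List Char)) :
    ' ' :: (ws.map (fun w => trN w 0 ++ [' '])).flatten =
      (ws.map (fun w => ' ' :: trN w 0)).flatten ++ [' '] := by
  induction ws with
  | nil => simp
  | cons w ws ih => simp [ih]

theorem solution_eq_R (s : String) : solution s = String.ofList (R s.toList 0) := by
  unfold solution
  rw [splitOn_eq_sp]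
  simp only [List.foldl_cons]
  have houter : ∀ (ws : List (List Char)) (a : List Char),
      ws.foldl (fun answer word => solAInner word answer ++ [' ']) a =
        a ++ (ws.map (fun w => trN w 0 ++ [' '])).flatten := by
    intro ws
    induction ws with
    | nil => intro a; simp
    | cons w ws ih => intro a; simp [List.foldl_cons, solAInner_eq]
  rw [houter, solAInner_eq]
  rw [PySem.List.slice_to_neg_one]
  rw [R_eq_split s.toList 0, List.append_assoc, List.singleton_append, flatten_shift,
    ← List.append_assoc, List.dropLast_concat, List.nil_append]

-- ===== VERDICT (by name: the statement is the Claim_ definition above) =====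
theorem solution_spec : Claim_equal_solution := by
  intro s _
  unfold Spec_solution solution_alt
  rw [solution_eq_R, foldl_solBStep]
  simp
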